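-- pv_equiv track=rewrite | github.com/GSYongWu/biotools | fastq_infos.py | qualitycount
-- ===== SOURCE A (Python) =====
-- def qualitycount(qualstring):
--     #chr(20+33)='5' chr(30+33)='?'
--     q20 = 0
--     q30 = 0
--     for n in qualstring:
--         if n >= '?':
--             q20 += 1
--             q30 += 1
--         elif n >= '5':
--             q20 += 1
--     return q20, q30
-- ===== SOURCE B (Python) =====
-- def qualitycount(qualstring):
--     # Two independent single-threshold tallies (chars >= '?' are also >= '5')
--     q20 = sum(1 for c in qualstring if c >= '5')
--     q30 = sum(1 for c in qualstring if c >= '?')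
--     return q20, q30
-- ===== Notes on version B (the rewrite author's own statement) =====
-- stated objective: simpler
-- what changed: Replaces the single fused if/elif loop updating coupled counters with two independent single-threshold tallies (q20 = #chars >= '5', q30 = #chars >= '?'), exploiting that the thresholds are nested.
import Mathlib
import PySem

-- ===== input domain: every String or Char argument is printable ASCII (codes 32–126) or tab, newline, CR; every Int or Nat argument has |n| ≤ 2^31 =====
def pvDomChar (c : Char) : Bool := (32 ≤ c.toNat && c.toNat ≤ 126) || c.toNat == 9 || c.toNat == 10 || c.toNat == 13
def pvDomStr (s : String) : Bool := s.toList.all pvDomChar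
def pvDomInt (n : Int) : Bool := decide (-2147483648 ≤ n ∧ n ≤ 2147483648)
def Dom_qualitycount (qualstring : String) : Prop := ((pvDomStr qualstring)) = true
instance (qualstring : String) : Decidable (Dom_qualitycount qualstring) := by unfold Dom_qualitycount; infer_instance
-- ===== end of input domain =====

-- B replaces A's fused if/elif pass with two independent single-threshold tallies; same value, objective: simpler.
-- ===== PORT A =====
def qualitycountLoopA (cs : List Char) (q20 q30 : Int) : Int × Int :=
  match cs with
  | [] => (q20, q30)
  | n :: rest =>
    if n ≥ '?' then qualitycountLoopA rest (q20 + 1) (q30 + 1)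
    else if n ≥ '5' then qualitycountLoopA rest (q20 + 1) q30
    else qualitycountLoopA rest q20 q30

def qualitycount (qualstring : String) : Int × Int :=
  qualitycountLoopA qualstring.toList 0 0

-- ===== PORT B =====
def qualitycount_alt (qualstring : String) : Int × Int :=
  ((qualstring.toList.countP (fun c => c ≥ '5') : Int),
   (qualstring.toList.countP (fun c => c ≥ '?') : Int))

-- ===== PRECONDITION & SPEC =====
def Spec_qualitycount (qualstring : String) (out : Int × Int) : Prop := out = qualitycount_alt qualstring
instance (qualstring : String) (out : Int × Int) : Decidable (Spec_qualitycount qualstring out) := by unfold Spec_qualitycount; infer_instance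

-- ===== CLAIM (what is proved, stated in full; the proofs are below) =====
def Claim_equal_qualitycount : Prop := ∀ (qualstring : String), Dom_qualitycount qualstring → Spec_qualitycount qualstring (qualitycount qualstring)

-- ===== LEMMAS AND PROOFS =====

-- ===== VERDICT (by name: the statement is the Claim_ definition above) =====
theorem qualitycountLoopA_eq (cs : List Char) (q20 q30 : Int) :
    qualitycountLoopA cs q20 q30 =
      (q20 + (cs.countP (fun c => c ≥ '5') : Int),
       q30 + (cs.countP (fun c => c ≥ '?') : Int)) := by
  induction cs generalizing q20 q30 with
  | nil => simp [qualitycountLoopA]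
  | cons n rest ih =>
    have h53 : n ≥ '?' → n ≥ '5' := by
      intro h
      exact le_trans (by decide) h
    by_cases h1 : n ≥ '?'
    · simp [qualitycountLoopA, h1, h53 h1, ih]
      constructor <;> omega
    · by_cases h2 : n ≥ '5'
      · simp [qualitycountLoopA, h1, h2, ih]
        omega
      · simp [qualitycountLoopA, h1, h2, ih]

theorem qualitycount_spec : Claim_equal_qualitycount := by
  intro q _
  unfold Spec_qualitycount qualitycount qualitycount_alt
  simp [qualitycountLoopA_eq]
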